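-- pv_equiv track=rewrite | github.com/podsi08/advent-of-code-2015 | day_1/day_1.py | part1
-- ===== SOURCE A (Python) =====
-- def part1(input_text):
--     floor = 0
--     for i in input_text:
--         if i == "(":
--             floor += 1
--         else:
--             floor -= 1
--     return floor
-- ===== SOURCE B (Python) =====
-- def part1(input_text):
--     return 2 * input_text.count("(") - len(input_text)
-- ===== Notes on version B (the rewrite author's own statement) =====
-- stated objective: faster
-- what changed: Replaces the per-character branching loop with a closed form over counts: twice the count of open parens minus the string length, so every other character still contributes -1 exactly as A does.
import Mathlib
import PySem

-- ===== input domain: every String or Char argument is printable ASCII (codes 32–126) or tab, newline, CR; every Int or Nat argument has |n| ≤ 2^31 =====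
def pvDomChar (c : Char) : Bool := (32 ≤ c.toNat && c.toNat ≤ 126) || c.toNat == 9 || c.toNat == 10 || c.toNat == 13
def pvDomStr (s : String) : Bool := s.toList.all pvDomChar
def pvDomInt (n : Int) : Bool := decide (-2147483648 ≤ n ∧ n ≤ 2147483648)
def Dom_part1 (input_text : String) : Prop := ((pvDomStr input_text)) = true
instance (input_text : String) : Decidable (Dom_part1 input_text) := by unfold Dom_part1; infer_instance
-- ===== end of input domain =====

-- B replaces A's per-character up/down loop with the closed form 2*count('(') - len(s)
-- (len, not count(')'), since A decrements on every non-'(' character); objective: simpler.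


-- ===== PORT A =====
def part1 (input_text : String) : Int :=
  input_text.toList.foldl (fun floor i => if i == '(' then floor + 1 else floor - 1) 0

-- ===== PORT B =====
def part1_alt (input_text : String) : Int :=
  2 * (PySem.Str.count input_text "(" : Int) - (PySem.Str.len input_text : Int)

-- ===== PRECONDITION & SPEC =====
def Spec_part1 (input_text : String) (out : Int) : Prop := out = part1_alt input_text
instance (input_text : String) (out : Int) : Decidable (Spec_part1 input_text out) := by unfold Spec_part1; infer_instance

-- ===== CLAIM (what is proved, stated in full; the proofs are below) =====
def Claim_equal_part1 : Prop := ∀ (input_text : String), Dom_part1 input_text → Spec_part1 input_text (part1 input_text)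

-- ===== LEMMAS AND PROOFS =====

-- ===== VERDICT (by name: the statement is the Claim_ definition above) =====
lemma go_single (c : Char) : ∀ (fuel : Nat) (l : List Char) (acc : Nat), l.length ≤ fuel →
    PySem.Chars.count.go [c] fuel l acc = acc + l.count c := by
  intro fuel
  induction fuel with
  | zero => intro l acc h; simp at h; simp [h, PySem.Chars.count.go]
  | succ n ih =>
    intro l acc h
    cases l with
    | nil => simp [PySem.Chars.count.go]
    | cons x t =>
      rw [PySem.Chars.count.go]
      simp only [List.isPrefixOf_cons₂, List.isPrefixOf_nil_left, Bool.and_true,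
        List.length_cons] at *
      by_cases hx : x = c
      · simp [hx, ih t _ (by omega)]; omega
      · have hbe : (c == x) = false := by simp [Ne.symm hx]
        simp [hbe, ih t _ (by omega), hx]

lemma count_single (cs : List Char) (c : Char) :
    PySem.Chars.count cs [c] = cs.count c := by
  simp [PySem.Chars.count, go_single c cs.length cs 0 le_rfl]

lemma foldl_paren (l : List Char) (a : Int) :
    l.foldl (fun floor i => if i == '(' then floor + 1 else floor - 1) a
      = a + 2 * (l.count '(' : Int) - (l.length : Int) := by
  induction l generalizing a with
  | nil => simp
  | cons c t ih =>
      simp only [List.foldl_cons, ih, List.count_cons, List.length_cons]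
      by_cases h : c = '(' <;> simp [h] <;> omega

theorem part1_spec : Claim_equal_part1 := by
  intro s _
  unfold Spec_part1 part1 part1_alt
  rw [foldl_paren]
  simp [PySem.Str.count_eq, PySem.Str.len_eq, count_single]
  try ring
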